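-- pv_equiv track=rewrite | github.com/Raiff1982/TheAi | codette_responder_generic.py | _select_perspectives
-- ===== SOURCE A (Python) =====
-- from typing import Dict, List, Any, Tuple, Optional
--
-- def _select_perspectives(query: str) -> List[str]:
--     """Select relevant perspectives based on query"""
--     query_lower = query.lower()
--
--     perspective_keywords = {
--         "newton": ["logic", "reason", "cause", "mechanism", "analyze", "objective", "fact"],
--         "mathematical": ["number", "measure", "calculate", "data", "quantitative", "precise"],
--         "da_vinci": ["create", "imagine", "novel", "synthesis", "cross-domain", "innovative"],
--         "neural_network": ["pattern", "learn", "recognize", "network", "connection", "brain"],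
--         "quantum": ["possibility", "uncertainty", "paradox", "superposition", "probability"],
--         "philosophical": ["mean", "purpose", "ethics", "existence", "truth", "question"],
--         "psychological": ["emotion", "motivation", "human", "mind", "behavior", "understand"],
--         "resilient_kindness": ["compassion", "care", "human", "gentle", "kind", "flourish"],
--         "bias_mitigation": ["bias", "fair", "equal", "perspective", "diverse", "blind spot"],
--         "copilot": ["collaborate", "together", "dialogue", "perspective", "other", "collective"],
--     }
--
--     perspective_scores = {}
--     for perspective, keywords in perspective_keywords.items():
--         score = sum(1 for keyword in keywords if keyword in query_lower)
--         perspective_scores[perspective] = score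
--
--     # Return all perspectives sorted by score (higher = more relevant)
--     sorted_perspectives = sorted(
--         perspective_scores.items(), key=lambda x: x[1], reverse=True
--     )
--
--     # Return top perspectives or all if many tied
--     top_score = sorted_perspectives[0][1] if sorted_perspectives else 0
--     return [p[0] for p in sorted_perspectives if p[1] >= max(0, top_score - 2)]
-- ===== SOURCE B (Python) =====
-- from typing import Dict, List, Any, Tuple, Optional
--
-- def _select_perspectives(query: str) -> List[str]:
--     """Select relevant perspectives based on query"""
--     query_lower = query.lower()
--
--     perspective_keywords = {
--         "newton": ["logic", "reason", "cause", "mechanism", "analyze", "objective", "fact"],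
--         "mathematical": ["number", "measure", "calculate", "data", "quantitative", "precise"],
--         "da_vinci": ["create", "imagine", "novel", "synthesis", "cross-domain", "innovative"],
--         "neural_network": ["pattern", "learn", "recognize", "network", "connection", "brain"],
--         "quantum": ["possibility", "uncertainty", "paradox", "superposition", "probability"],
--         "philosophical": ["mean", "purpose", "ethics", "existence", "truth", "question"],
--         "psychological": ["emotion", "motivation", "human", "mind", "behavior", "understand"],
--         "resilient_kindness": ["compassion", "care", "human", "gentle", "kind", "flourish"],
--         "bias_mitigation": ["bias", "fair", "equal", "perspective", "diverse", "blind spot"],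
--         "copilot": ["collaborate", "together", "dialogue", "perspective", "other", "collective"],
--     }
--
--     # One pass: score every perspective, keeping the original order.
--     scores = [
--         (name, sum(1 for kw in kws if kw in query_lower))
--         for name, kws in perspective_keywords.items()
--     ]
--     top = max(s for _, s in scores)
--     threshold = max(0, top - 2)
--
--     # Counting sweep instead of a sort: emit buckets from the top score down
--     # to the threshold; appending in original order keeps ties stable.
--     return [name for s in range(top, threshold - 1, -1)
--             for name, sc in scores if sc == s]
-- ===== Notes on version B (the rewrite author's own statement) =====
-- stated objective: simpler
-- what changed: B replaces A's dict-building plus full stable sort and threshold filter by a single scoring pass followed by a counting sweep: it takes the maximum score and concatenates the score buckets from the top score down to the threshold, so no sort is performed and ties keep the table order.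
import Mathlib
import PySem

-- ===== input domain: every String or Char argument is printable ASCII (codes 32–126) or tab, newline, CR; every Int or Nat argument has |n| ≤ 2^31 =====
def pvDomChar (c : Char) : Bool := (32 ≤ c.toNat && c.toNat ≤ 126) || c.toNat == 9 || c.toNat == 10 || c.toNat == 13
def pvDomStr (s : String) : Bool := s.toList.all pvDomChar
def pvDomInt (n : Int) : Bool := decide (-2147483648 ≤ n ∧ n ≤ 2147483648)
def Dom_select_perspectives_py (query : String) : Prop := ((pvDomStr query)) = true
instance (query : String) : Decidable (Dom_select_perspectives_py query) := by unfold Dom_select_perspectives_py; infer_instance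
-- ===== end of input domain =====

-- B replaces the sort-then-threshold-filter by a counting sweep: it scores each
-- perspective once, takes the maximum, and emits the score buckets from the top
-- score down to the threshold, so no sort is performed (objective: simpler).

-- ===== PORT A =====
-- the literal keyword table shared by both Pythons
def pvKeywords : List (String × List String) :=
  [ ("newton", ["logic", "reason", "cause", "mechanism", "analyze", "objective", "fact"]),
    ("mathematical", ["number", "measure", "calculate", "data", "quantitative", "precise"]),
    ("da_vinci", ["create", "imagine", "novel", "synthesis", "cross-domain", "innovative"]),
    ("neural_network", ["pattern", "learn", "recognize", "network", "connection", "brain"]),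
    ("quantum", ["possibility", "uncertainty", "paradox", "superposition", "probability"]),
    ("philosophical", ["mean", "purpose", "ethics", "existence", "truth", "question"]),
    ("psychological", ["emotion", "motivation", "human", "mind", "behavior", "understand"]),
    ("resilient_kindness", ["compassion", "care", "human", "gentle", "kind", "flourish"]),
    ("bias_mitigation", ["bias", "fair", "equal", "perspective", "diverse", "blind spot"]),
    ("copilot", ["collaborate", "together", "dialogue", "perspective", "other", "collective"]) ]

def select_perspectives_py (query : String) : List String :=
  let queryLower := PySem.Str.lower query
  let perspectiveScores : PySem.Dict String Int :=
    pvKeywords.foldl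
      (fun d pk =>
        d.insert pk.1 ((pk.2.map (fun kw => if PySem.Str.isIn kw queryLower then (1 : Int) else 0)).sum))
      PySem.Dict.empty
  let sortedPerspectives := PySem.List.sorted perspectiveScores.items (fun x => x.2) true
  -- 'sorted_perspectives[0][1] if sorted_perspectives else 0'
  let topScore : Int := sortedPerspectives.head?.elim 0 (fun p => p.2)
  (sortedPerspectives.filter (fun p => decide (max 0 (topScore - 2) ≤ p.2))).map (fun p => p.1)

-- ===== PORT B =====
def select_perspectives_py_alt (query : String) : List String :=
  let queryLower := PySem.Str.lower query
  let scores : List (String × Int) :=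
    pvKeywords.map
      (fun pk => (pk.1, (pk.2.map (fun kw => if PySem.Str.isIn kw queryLower then (1 : Int) else 0)).sum))
  -- totality guard: max? is none only on an empty list, which the non-empty table rules out
  (PySem.List.max? (scores.map (fun x => x.2)) (fun s => s)).elim []
    (fun top =>
      let threshold := max 0 (top - 2)
      (PySem.List.pyRange top (threshold - 1) (-1)).flatMap
        (fun s => (scores.filter (fun q => q.2 == s)).map (fun q => q.1)))

-- ===== PRECONDITION & SPEC =====
def Spec_select_perspectives_py (query : String) (out : List String) : Prop := out = select_perspectives_py_alt query
instance (query : String) (out : List String) : Decidable (Spec_select_perspectives_py query out) := by unfold Spec_select_perspectives_py; infer_instance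

-- ===== CLAIM (what is proved, stated in full; the proofs are below) =====
def Claim_equal_select_perspectives_py : Prop := ∀ (query : String), Dom_select_perspectives_py query → Spec_select_perspectives_py query (select_perspectives_py query)

-- ===== LEMMAS AND PROOFS =====

-- the descending list of integers [hi, hi-1, …, lo] ([] if hi < lo); proof-side bucket index
def pvDescList (hi lo : Int) : List Int :=
  (List.range ((hi + 1 - lo).toNat)).map (fun (i : Nat) => hi - (i : Int))

theorem pvDescList_cons (hi lo : Int) (h : lo ≤ hi) :
    pvDescList hi lo = hi :: pvDescList (hi - 1) lo := by
  unfold pvDescList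
  have hn : (hi + 1 - lo).toNat = (hi - 1 + 1 - lo).toNat + 1 := by omega
  rw [hn, List.range_succ_eq_map, List.map_cons, List.map_map]
  refine congrArg₂ List.cons (by simp) (List.map_congr_left ?_)
  intro i _
  simp only [Function.comp_apply, Nat.succ_eq_add_one]
  push_cast
  ring

theorem pvDescList_nil (hi lo : Int) (h : hi < lo) : pvDescList hi lo = [] := by
  unfold pvDescList
  have : (hi + 1 - lo).toNat = 0 := by omega
  rw [this]
  rfl

theorem pvMem_descList (hi lo v : Int) : v ∈ pvDescList hi lo ↔ lo ≤ v ∧ v ≤ hi := by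
  unfold pvDescList
  simp only [List.mem_map, List.mem_range]
  constructor
  · rintro ⟨i, hi', rfl⟩; omega
  · rintro ⟨h1, h2⟩; exact ⟨(hi - v).toNat, by omega, by omega⟩

theorem pvDescList_split (m lo : Int) (h1 : lo ≤ m) :
    ∀ (n : Nat) (hi : Int), (hi - m).toNat = n → m ≤ hi →
      pvDescList hi lo = pvDescList hi (m + 1) ++ pvDescList m lo := by
  intro n
  induction n with
  | zero =>
      intro hi hn hm
      have hem : hi = m := by omega
      subst hem
      rw [pvDescList_nil hi (hi + 1) (by omega)]
      rfl
  | succ k ih =>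
      intro hi hn hm
      have hlt : m < hi := by omega
      rw [pvDescList_cons hi lo (by omega), pvDescList_cons hi (m + 1) (by omega),
        ih (hi - 1) (by omega) (by omega)]
      rfl

-- bucket decomposition of the threshold filter on a key-nonincreasing list
theorem pvBD (lo : Int) :
    ∀ (S : List (String × Int)) (hi : Int), lo ≤ hi →
      S.Pairwise (fun a b => b.2 ≤ a.2) → (∀ p ∈ S, p.2 ≤ hi) →
      S.filter (fun p => decide (lo ≤ p.2))
        = (pvDescList hi lo).flatMap (fun v => S.filter (fun p => p.2 == v)) := by
  intro S
  induction S with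
  | nil => intro hi _ _ _; simp
  | cons x rest ih =>
      intro hi hlohi hp hb
      have hx : ∀ b ∈ rest, b.2 ≤ x.2 := (List.pairwise_cons.1 hp).1
      have hr : rest.Pairwise (fun a b => b.2 ≤ a.2) := (List.pairwise_cons.1 hp).2
      have hxhi : x.2 ≤ hi := hb x List.mem_cons_self
      by_cases hxlo : lo ≤ x.2
      · rw [pvDescList_split x.2 lo hxlo (hi - x.2).toNat hi rfl hxhi, List.flatMap_append]
        have h1 : (pvDescList hi (x.2 + 1)).flatMap (fun v => (x :: rest).filter (fun p => p.2 == v)) = [] := by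
          rw [List.flatMap_eq_nil_iff]
          intro v hv
          have hv' := (pvMem_descList hi (x.2 + 1) v).1 hv
          rw [List.filter_eq_nil_iff]
          intro p hp'
          rcases List.mem_cons.1 hp' with rfl | hp'
          · simp; omega
          · have := hx _ hp'; simp; omega
        rw [h1, List.nil_append, pvDescList_cons x.2 lo hxlo, List.flatMap_cons]
        have h2 : (x :: rest).filter (fun p => p.2 == x.2) = x :: rest.filter (fun p => p.2 == x.2) := by
          simp
        have h3 : (pvDescList (x.2 - 1) lo).flatMap (fun v => (x :: rest).filter (fun p => p.2 == v))
            = (pvDescList (x.2 - 1) lo).flatMap (fun v => rest.filter (fun p => p.2 == v)) := by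
          apply List.flatMap_congr
          intro v hv
          have hv' := (pvMem_descList (x.2 - 1) lo v).1 hv
          rw [List.filter_cons_of_neg (by simp; omega)]
        rw [h2, h3, List.filter_cons_of_pos (by simpa using hxlo), List.cons_append]
        congr 1
        rw [ih x.2 hxlo hr hx, pvDescList_cons x.2 lo hxlo, List.flatMap_cons]
      · have hxlt : x.2 < lo := by omega
        rw [List.filter_cons_of_neg (by simpa using hxlo)]
        rw [ih hi hlohi hr (fun p hp' => hb p (List.mem_cons_of_mem x hp'))]
        apply List.flatMap_congr
        intro v hv
        have hv' := (pvMem_descList hi lo v).1 hv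
        rw [List.filter_cons_of_neg (by simp; omega)]

-- stable insertion keeps the relative order inside one score bucket
theorem pvFilter_insertBy (v : Int) (x : String × Int) :
    ∀ (l : List (String × Int)), l.Pairwise (fun a b => b.2 ≤ a.2) →
      (PySem.List.insertBy (fun a b => decide (b.2 < a.2)) x l).filter (fun p => p.2 == v)
        = if x.2 == v then l.filter (fun p => p.2 == v) ++ [x] else l.filter (fun p => p.2 == v) := by
  intro l
  induction l with
  | nil =>
      intro _
      by_cases hv : x.2 = v <;> simp [PySem.List.insertBy, hv]
  | cons y ys ih =>
      intro hp
      have hy : ∀ b ∈ ys, b.2 ≤ y.2 := (List.pairwise_cons.1 hp).1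
      have hys : ys.Pairwise (fun a b => b.2 ≤ a.2) := (List.pairwise_cons.1 hp).2
      show (if (decide (y.2 < x.2)) = true then x :: y :: ys else y :: PySem.List.insertBy _ x ys).filter _ = _
      by_cases hlt : y.2 < x.2
      · rw [if_pos (by simpa using hlt)]
        by_cases hv : x.2 = v
        · have hrest : (y :: ys).filter (fun p => p.2 == v) = [] := by
            rw [List.filter_eq_nil_iff]
            intro p hp'
            rcases List.mem_cons.1 hp' with rfl | hp'
            · simp; omega
            · have := hy _ hp'; simp; omega
          rw [if_pos (by simpa using hv)]
          rw [List.filter_cons_of_pos (by simpa using hv), hrest]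
          rfl
        · rw [if_neg (by simpa using hv)]
          rw [List.filter_cons_of_neg (by simpa using hv)]
      · rw [if_neg (by simpa using hlt)]
        rw [List.filter_cons, List.filter_cons, ih hys]
        by_cases hyv : y.2 = v <;> by_cases hxv : x.2 = v <;> simp [hyv, hxv]

-- stability of the reverse sort: each score bucket keeps the original order
theorem pvFilter_sorted (v : Int) (S : List (String × Int)) :
    (PySem.List.sorted S (fun x => x.2) true).filter (fun p => p.2 == v)
      = S.filter (fun p => p.2 == v) := by
  induction S using List.reverseRecOn with
  | nil => rfl
  | append_singleton S x ih =>
      have hfold : PySem.List.sorted (S ++ [x]) (fun p : String × Int => p.2) true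
          = PySem.List.insertBy (fun a b : String × Int => decide (b.2 < a.2)) x
              (PySem.List.sorted S (fun p => p.2) true) := by
        rw [PySem.List.sorted_rev_eq_foldl_insertBy, PySem.List.sorted_rev_eq_foldl_insertBy,
          List.foldl_append]
        rfl
      rw [hfold, pvFilter_insertBy v x _ (PySem.List.sorted_pairwise_rev S (fun p => p.2)),
        List.filter_append]
      by_cases hv : x.2 = v
      · rw [if_pos (by simpa using hv), ih]
        simp [hv]
      · rw [if_neg (by simpa using hv), ih]
        simp [hv]

-- pyRange(top, threshold-1, -1) is the descending bucket index
theorem pvRange_eq (M : Int) (h0 : 0 ≤ M) (h7 : M ≤ 7) :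
    PySem.List.pyRange M (max 0 (M - 2) - 1) (-1) = pvDescList M (max 0 (M - 2)) := by
  interval_cases M <;> decide

-- the core equivalence, stated over an arbitrary score list
theorem pvCore (S : List (String × Int)) (hne : S ≠ [])
    (h0 : ∀ p ∈ S, 0 ≤ p.2) (h7 : ∀ p ∈ S, p.2 ≤ 7) :
    ((PySem.List.sorted S (fun x => x.2) true).filter
        (fun p => decide (max 0 (((PySem.List.sorted S (fun x => x.2) true).head?.elim 0 (fun p => p.2)) - 2) ≤ p.2))).map (fun p => p.1)
      = (PySem.List.max? (S.map (fun x => x.2)) (fun s => s)).elim []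
          (fun top =>
            (PySem.List.pyRange top (max 0 (top - 2) - 1) (-1)).flatMap
              (fun s => (S.filter (fun q => q.2 == s)).map (fun q => q.1))) := by
  rcases hmax : PySem.List.max? (S.map (fun x => x.2)) (fun s => s) with _ | M
  · exact absurd (by simpa using (PySem.List.max?_eq_none_iff _ _).1 hmax) hne
  have hMmem : M ∈ S.map (fun x => x.2) := PySem.List.max?_mem hmax
  have hMmax : ∀ v ∈ S.map (fun x => x.2), v ≤ M := PySem.List.max?_isMax hmax
  have hM0 : 0 ≤ M := by
    rcases List.mem_map.1 hMmem with ⟨p, hp, rfl⟩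
    exact h0 p hp
  have hM7 : M ≤ 7 := by
    rcases List.mem_map.1 hMmem with ⟨p, hp, rfl⟩
    exact h7 p hp
  rcases hSs : PySem.List.sorted S (fun x => x.2) true with _ | ⟨m, t⟩
  · exact absurd ((PySem.List.sorted_eq_nil_iff S (fun x => x.2) true).1 hSs) hne
  -- the head of the reverse-sorted list carries the maximal score
  have hmM : m.2 = M := by
    have hmem : m ∈ S := (PySem.List.mem_sorted S (fun x => x.2) true m).1 (hSs ▸ List.mem_cons_self)
    have h1 : m.2 ≤ M := hMmax m.2 (List.mem_map.2 ⟨m, hmem, rfl⟩)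
    rcases List.mem_map.1 hMmem with ⟨y, hy, rfl⟩
    have h2 : y.2 ≤ m.2 :=
      PySem.List.key_head_sorted_rev_ge S (fun x => x.2) hSs y hy
    omega
  have hkeyle : ∀ p ∈ m :: t, p.2 ≤ M := by
    intro p hp
    have : p ∈ S := (PySem.List.mem_sorted S (fun x => x.2) true p).1 (hSs ▸ hp)
    exact hMmax p.2 (List.mem_map.2 ⟨p, this, rfl⟩)
  have hpair : (m :: t).Pairwise (fun a b : String × Int => b.2 ≤ a.2) :=
    hSs ▸ PySem.List.sorted_pairwise_rev S (fun x => x.2)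
  have hthr : max 0 (M - 2) ≤ M := by omega
  rw [hmax]
  simp only [List.head?_cons, Option.elim, hmM]
  rw [pvBD (max 0 (M - 2)) (m :: t) M hthr hpair hkeyle]
  rw [pvRange_eq M hM0 hM7, List.map_flatMap]
  apply List.flatMap_congr
  intro v _
  rw [← hSs, pvFilter_sorted v S]

-- the dict of scores, built over the literal table, lists its items in table order
theorem pvItems (g : List String → Int) :
    (pvKeywords.foldl (fun d pk => d.insert pk.1 (g pk.2))
        (PySem.Dict.empty : PySem.Dict String Int)).items
      = pvKeywords.map (fun pk => (pk.1, g pk.2)) := by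
  simp [pvKeywords, PySem.Dict.insert, PySem.Dict.empty, PySem.Dict.contains]

-- score bounds: every keyword list in the table has at most 7 entries
theorem pvScore_bounds (c : String → Bool) (pk : String × List String) (hpk : pk ∈ pvKeywords) :
    0 ≤ (pk.2.map (fun kw => if c kw then (1 : Int) else 0)).sum
      ∧ (pk.2.map (fun kw => if c kw then (1 : Int) else 0)).sum ≤ 7 := by
  rw [PySem.List.sum_map_ite_one_zero]
  have hlen : pk.2.length ≤ 7 := by fin_cases hpk <;> decide
  have hcount : pk.2.countP c ≤ pk.2.length := List.countP_le_length
  omega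

-- zeta-reduced reading of port A
theorem pvA_eq (query : String) :
    select_perspectives_py query
      = ((PySem.List.sorted
            (pvKeywords.foldl
              (fun d pk =>
                d.insert pk.1 ((pk.2.map (fun kw => if PySem.Str.isIn kw (PySem.Str.lower query) then (1 : Int) else 0)).sum))
              (PySem.Dict.empty : PySem.Dict String Int)).items (fun x => x.2) true).filter
          (fun p => decide (max 0 (((PySem.List.sorted
            (pvKeywords.foldl
              (fun d pk =>
                d.insert pk.1 ((pk.2.map (fun kw => if PySem.Str.isIn kw (PySem.Str.lower query) then (1 : Int) else 0)).sum))
              (PySem.Dict.empty : PySem.Dict String Int)).items (fun x => x.2) true).head?.elim 0 (fun p => p.2)) - 2) ≤ p.2))).map (fun p => p.1) := rfl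

-- zeta-reduced reading of port B
theorem pvB_eq (query : String) :
    select_perspectives_py_alt query
      = (PySem.List.max?
            ((pvKeywords.map
              (fun pk => (pk.1, (pk.2.map (fun kw => if PySem.Str.isIn kw (PySem.Str.lower query) then (1 : Int) else 0)).sum))).map (fun x => x.2))
            (fun s => s)).elim []
          (fun top =>
            (PySem.List.pyRange top (max 0 (top - 2) - 1) (-1)).flatMap
              (fun s =>
                ((pvKeywords.map
                  (fun pk => (pk.1, (pk.2.map (fun kw => if PySem.Str.isIn kw (PySem.Str.lower query) then (1 : Int) else 0)).sum))).filter
                    (fun q => q.2 == s)).map (fun q => q.1))) := rfl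

-- ===== VERDICT (by name: the statement is the Claim_ definition above) =====
set_option maxHeartbeats 1000000 in
theorem select_perspectives_py_spec : Claim_equal_select_perspectives_py := by
  intro query _
  show select_perspectives_py query = select_perspectives_py_alt query
  rw [pvA_eq, pvB_eq,
    pvItems (fun kws => (kws.map (fun kw => if PySem.Str.isIn kw (PySem.Str.lower query) then (1 : Int) else 0)).sum)]
  exact pvCore _ (by simp [pvKeywords])
    (fun p hp => by
      rcases List.mem_map.1 hp with ⟨pk, hpk, rfl⟩
      exact (pvScore_bounds _ pk hpk).1)
    (fun p hp => by
      rcases List.mem_map.1 hp with ⟨pk, hpk, rfl⟩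
      exact (pvScore_bounds _ pk hpk).2)
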